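-- pv_equiv track=rewrite | github.com/Ruales1138/Examenes-ADA | HeiverDavidRualesLuna.py | recorrer_matriz
-- ===== SOURCE A (Python) =====
-- def recorrer_matriz(matriz: list[list], i: int, j: int, direccion: str = None, resultado: str = ''):
--     if direccion is None:
--         return f"Izquierda: {recorrer_matriz(matriz, i, j, 'izquierda')} \nDerecha: {recorrer_matriz(matriz, i, j, 'derecha')} \nArriba: {recorrer_matriz(matriz, i, j, 'arriba')} \nAbajo: {recorrer_matriz(matriz, i, j, 'abajo')}"
--     if direccion == 'izquierda':
--         if j == -1:
--             return resultado
--         resultado = resultado + matriz[i][j]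
--         return recorrer_matriz(matriz, i, j-1, 'izquierda', resultado)
--     if direccion == 'derecha':
--         if j == len(matriz[0]):
--             return resultado
--         resultado = resultado + matriz[i][j]
--         return recorrer_matriz(matriz, i, j+1, 'derecha', resultado)
--     if direccion == 'arriba':
--         if i == -1:
--             return resultado
--         resultado = resultado + matriz[i][j]
--         return recorrer_matriz(matriz, i-1, j, 'arriba', resultado)
--     if direccion == 'abajo':
--         if i == len(matriz):
--             return resultado
--         resultado = resultado + matriz[i][j]
--         return recorrer_matriz(matriz, i+1, j, 'abajo', resultado)
-- ===== SOURCE B (Python) =====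
-- def recorrer_matriz(matriz: list[list], i: int, j: int, direccion: str = None, resultado: str = ''):
--     if direccion is None:
--         partes = [recorrer_matriz(matriz, i, j, d) for d in ('izquierda', 'derecha', 'arriba', 'abajo')]
--         return "Izquierda: {} \nDerecha: {} \nArriba: {} \nAbajo: {}".format(*partes)
--     if direccion == 'izquierda':
--         return resultado + ''.join(matriz[i][k] for k in range(j, -1, -1))
--     if direccion == 'derecha':
--         return resultado + ''.join(matriz[i][k] for k in range(j, len(matriz[0])))
--     if direccion == 'arriba':
--         return resultado + ''.join(matriz[k][j] for k in range(i, -1, -1))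
--     if direccion == 'abajo':
--         return resultado + ''.join(matriz[k][j] for k in range(i, len(matriz)))
-- ===== Notes on version B (the rewrite author's own statement) =====
-- stated objective: alternative
-- what changed: Each directional tail-recursive character walk is replaced by a staged computation: build the explicit index range (range(j,-1,-1) / range(j,len) etc.) and join the matrix cells along it; the None branch formats the four direction strings with str.format over a list.
import Mathlib
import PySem

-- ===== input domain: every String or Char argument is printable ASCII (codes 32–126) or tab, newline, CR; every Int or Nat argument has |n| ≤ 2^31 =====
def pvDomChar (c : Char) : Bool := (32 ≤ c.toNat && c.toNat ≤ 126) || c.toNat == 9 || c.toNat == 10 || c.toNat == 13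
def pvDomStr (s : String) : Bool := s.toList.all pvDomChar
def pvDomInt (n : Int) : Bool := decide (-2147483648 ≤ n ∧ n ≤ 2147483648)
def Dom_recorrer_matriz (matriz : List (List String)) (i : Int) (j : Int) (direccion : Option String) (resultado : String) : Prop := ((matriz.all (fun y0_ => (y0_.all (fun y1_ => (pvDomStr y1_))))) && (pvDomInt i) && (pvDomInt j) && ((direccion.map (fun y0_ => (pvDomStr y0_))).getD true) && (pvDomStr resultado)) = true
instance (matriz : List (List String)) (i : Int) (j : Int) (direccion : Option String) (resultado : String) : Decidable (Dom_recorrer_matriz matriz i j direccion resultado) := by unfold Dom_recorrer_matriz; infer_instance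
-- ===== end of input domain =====

-- B replaces A's four tail-recursive walks by staged index-range construction plus a join over the
-- cells along the range (alternative decomposition); return value only, no mutation.

-- bound fact used by the termination measures of port A
theorem pvGetSomeBounds {α : Type} (xs : List α) (k : Int) (v : α)
    (h : PySem.List.pyGet? xs k = some v) : -(xs.length : Int) ≤ k ∧ k < xs.length := by
  by_contra hc
  have hn : PySem.List.pyGet? xs k = none := by
    rw [PySem.List.pyGet?_eq_none_iff]
    simp [PySem.Raise.InRange]
    omega
  simp [hn] at h

-- ===== PORT A =====
def recorrer_matriz (matriz : List (List String)) (i : Int) (j : Int) (direccion : Option String) (resultado : String) : Option String :=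
  match direccion with
  | none =>
    -- f"Izquierda: {…} \nDerecha: {…} \nArriba: {…} \nAbajo: {…}"; an inner raise (none) propagates
    match recorrer_matriz matriz i j (some "izquierda") "",
          recorrer_matriz matriz i j (some "derecha") "",
          recorrer_matriz matriz i j (some "arriba") "",
          recorrer_matriz matriz i j (some "abajo") "" with
    | some a, some b, some c, some d =>
        some ("Izquierda: " ++ a ++ " \nDerecha: " ++ b ++ " \nArriba: " ++ c ++ " \nAbajo: " ++ d)
    | _, _, _, _ => none
  | some dir =>
    if dir = "izquierda" then
      if j = -1 then some resultado else
      match hstep : (PySem.List.pyGet? matriz i).bind (fun row => PySem.List.pyGet? row j) with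
      | none => none
      | some s => recorrer_matriz matriz i (j - 1) (some "izquierda") (resultado ++ s)
    else if dir = "derecha" then
      match PySem.List.pyGet? matriz 0 with
      | none => none   -- len(matriz[0]) raises on empty matriz
      | some row0 =>
        if j = (row0.length : Int) then some resultado else
        match hstep : (PySem.List.pyGet? matriz i).bind (fun row => PySem.List.pyGet? row j) with
        | none => none
        | some s => recorrer_matriz matriz i (j + 1) (some "derecha") (resultado ++ s)
    else if dir = "arriba" then
      if i = -1 then some resultado else
      match hstep : (PySem.List.pyGet? matriz i).bind (fun row => PySem.List.pyGet? row j) with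
      | none => none
      | some s => recorrer_matriz matriz (i - 1) j (some "arriba") (resultado ++ s)
    else if dir = "abajo" then
      if i = (matriz.length : Int) then some resultado else
      match hstep : (PySem.List.pyGet? matriz i).bind (fun row => PySem.List.pyGet? row j) with
      | none => none
      | some s => recorrer_matriz matriz (i + 1) j (some "abajo") (resultado ++ s)
    else none   -- falls off the if-chain: Python returns None
termination_by
  ((if direccion = none then 1 else 0),
   match direccion with
   | some "izquierda" => (j + ((PySem.List.pyGet? matriz i).getD []).length + 1).toNat
   | some "derecha" => ((((PySem.List.pyGet? matriz i).getD []).length : Int) - j).toNat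
   | some "arriba" => (i + matriz.length + 1).toNat
   | some "abajo" => ((matriz.length : Int) - i).toNat
   | _ => 0)
decreasing_by
  · exact Prod.Lex.left _ _ (by simp)
  · exact Prod.Lex.left _ _ (by simp)
  · exact Prod.Lex.left _ _ (by simp)
  · exact Prod.Lex.left _ _ (by simp)
  · rename_i hd hne
    subst hd
    apply Prod.Lex.right'
    · simp
    · obtain ⟨row, hrow, hs⟩ := Option.bind_eq_some_iff.mp hstep
      have hb := pvGetSomeBounds _ _ _ hs
      simp [hrow]
      omega
  · rename_i h1 hd hne
    subst hd
    apply Prod.Lex.right'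
    · simp
    · obtain ⟨row, hrow, hs⟩ := Option.bind_eq_some_iff.mp hstep
      have hb := pvGetSomeBounds _ _ _ hs
      simp [hrow]
      omega
  · rename_i h1 h2 hd hne
    subst hd
    apply Prod.Lex.right'
    · simp
    · obtain ⟨row, hrow, hs⟩ := Option.bind_eq_some_iff.mp hstep
      have hb := pvGetSomeBounds _ _ _ hrow
      simp
      omega
  · rename_i h1 h2 h3 hd hne
    subst hd
    apply Prod.Lex.right'
    · simp
    · obtain ⟨row, hrow, hs⟩ := Option.bind_eq_some_iff.mp hstep
      have hb := pvGetSomeBounds _ _ _ hrow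
      simp
      omega

-- ===== PORT B =====
-- ''.join(matriz[r][c] for (r,c) in cells): lazy, stops (raises) at the first bad index
def pvCollect (matriz : List (List String)) (ps : List (Int × Int)) : Option String :=
  match ps with
  | [] => some ""
  | (r, c) :: rest =>
    match (PySem.List.pyGet? matriz r).bind (fun row => PySem.List.pyGet? row c) with
    | none => none
    | some s => (pvCollect matriz rest).map (fun t => s ++ t)

-- one direction of Source B: build the index range, gather the cells, prepend resultado
def pvGather (matriz : List (List String)) (i : Int) (j : Int) (dir : String) (res : String) : Option String :=
  if dir = "izquierda" then
    (pvCollect matriz ((PySem.List.pyRange j (-1) (-1)).map (fun k => (i, k)))).map (fun t => res ++ t)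
  else if dir = "derecha" then
    match PySem.List.pyGet? matriz 0 with
    | none => none   -- len(matriz[0]) raises on empty matriz
    | some row0 =>
      (pvCollect matriz ((PySem.List.pyRange j (row0.length : Int) 1).map (fun k => (i, k)))).map (fun t => res ++ t)
  else if dir = "arriba" then
    (pvCollect matriz ((PySem.List.pyRange i (-1) (-1)).map (fun k => (k, j)))).map (fun t => res ++ t)
  else if dir = "abajo" then
    (pvCollect matriz ((PySem.List.pyRange i (matriz.length : Int) 1).map (fun k => (k, j)))).map (fun t => res ++ t)
  else none

def recorrer_matriz_alt (matriz : List (List String)) (i : Int) (j : Int) (direccion : Option String) (resultado : String) : Option String :=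
  match direccion with
  | none =>
    -- partes = [… for d in (…)]; "…".format(*partes); a raise inside the list comp propagates
    (pvGather matriz i j "izquierda" "").bind fun a =>
    (pvGather matriz i j "derecha" "").bind fun b =>
    (pvGather matriz i j "arriba" "").bind fun c =>
    (pvGather matriz i j "abajo" "").map fun d =>
      "Izquierda: " ++ a ++ " \nDerecha: " ++ b ++ " \nArriba: " ++ c ++ " \nAbajo: " ++ d
  | some dir => pvGather matriz i j dir resultado

-- ===== PRECONDITION & SPEC =====
-- Pre_ is exactly where the Python A returns normally: per direction, the walk stays inside the
-- matrix until its stop index (elsewhere A raises IndexError / exceeds the recursion depth).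
def pvRowOf (matriz : List (List String)) (i : Int) : List String := (PySem.List.pyGet? matriz i).getD []

def pvOkIzq (matriz : List (List String)) (i : Int) (j : Int) : Prop :=
  j = -1 ∨ (-(matriz.length : Int) ≤ i ∧ i < matriz.length ∧ 0 ≤ j ∧ j < (pvRowOf matriz i).length)

def pvOkDer (matriz : List (List String)) (i : Int) (j : Int) : Prop :=
  0 < matriz.length ∧
  (j = ((matriz.headD []).length : Int) ∨
   (-(matriz.length : Int) ≤ i ∧ i < matriz.length ∧
    -((pvRowOf matriz i).length : Int) ≤ j ∧ j < ((matriz.headD []).length : Int) ∧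
    (matriz.headD []).length ≤ (pvRowOf matriz i).length))

def pvOkArr (matriz : List (List String)) (i : Int) (j : Int) : Prop :=
  i = -1 ∨ (0 ≤ i ∧ i < matriz.length ∧
    ∀ k ∈ List.range matriz.length, (k : Int) ≤ i →
      (-((matriz.getD k []).length : Int) ≤ j ∧ j < ((matriz.getD k []).length : Int)))

def pvOkAb (matriz : List (List String)) (i : Int) (j : Int) : Prop :=
  i = (matriz.length : Int) ∨ (-(matriz.length : Int) ≤ i ∧ i < matriz.length ∧
    ∀ k ∈ List.range matriz.length, (i ≤ (k : Int) ∨ i < 0) →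
      (-((matriz.getD k []).length : Int) ≤ j ∧ j < ((matriz.getD k []).length : Int)))

def Pre_recorrer_matriz (matriz : List (List String)) (i : Int) (j : Int) (direccion : Option String) (resultado : String) : Prop :=
  if direccion = none then pvOkIzq matriz i j ∧ pvOkDer matriz i j ∧ pvOkArr matriz i j ∧ pvOkAb matriz i j
  else if direccion = some "izquierda" then pvOkIzq matriz i j
  else if direccion = some "derecha" then pvOkDer matriz i j
  else if direccion = some "arriba" then pvOkArr matriz i j
  else if direccion = some "abajo" then pvOkAb matriz i j
  else True
instance (matriz : List (List String)) (i : Int) (j : Int) (direccion : Option String) (resultado : String) : Decidable (Pre_recorrer_matriz matriz i j direccion resultado) := by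
  unfold Pre_recorrer_matriz pvOkIzq pvOkDer pvOkArr pvOkAb; infer_instance

def pvWitness_recorrer_matriz : List (List String) × Int × Int × Option String × String :=
  ([["a", "b"], ["c", "d"]], 0, 1, none, "")

def Spec_recorrer_matriz (matriz : List (List String)) (i : Int) (j : Int) (direccion : Option String) (resultado : String) (out : Option String) : Prop := out = recorrer_matriz_alt matriz i j direccion resultado
instance (matriz : List (List String)) (i : Int) (j : Int) (direccion : Option String) (resultado : String) (out : Option String) : Decidable (Spec_recorrer_matriz matriz i j direccion resultado out) := by unfold Spec_recorrer_matriz; infer_instance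

-- ===== CLAIM (what is proved, stated in full; the proofs are below) =====
def Claim_equal_recorrer_matriz : Prop := ∀ (matriz : List (List String)) (i : Int) (j : Int) (direccion : Option String) (resultado : String), Dom_recorrer_matriz matriz i j direccion resultado → Pre_recorrer_matriz matriz i j direccion resultado → Spec_recorrer_matriz matriz i j direccion resultado (recorrer_matriz matriz i j direccion resultado)

-- ===== LEMMAS AND PROOFS =====
theorem pv_izq (matriz : List (List String)) (i : Int) :
    ∀ (n : ℕ) (j : Int) (res : String), j + 1 = n →
    recorrer_matriz matriz i j (some "izquierda") res =
      (pvCollect matriz ((PySem.List.pyRange j (-1) (-1)).map (fun k => (i, k)))).map (fun t => res ++ t) := by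
  intro n
  induction n with
  | zero =>
    intro j res hj
    have hj' : j = -1 := by omega
    subst hj'
    rw [recorrer_matriz, PySem.List.pyRange_neg_one_eq_nil (by omega)]
    simp [pvCollect]
  | succ m ih =>
    intro j res hj
    have hj0 : (0:Int) ≤ j := by omega
    rw [recorrer_matriz, PySem.List.pyRange_neg_one_cons (by omega)]
    simp only [List.map_cons, pvCollect]
    have hne : ¬ (j = -1) := by omega
    simp only [hne, String.reduceEq, reduceIte, if_false, if_true]
    split <;> rename_i hstep
    · simp [hstep]
    · rename_i s
      simp only [hstep]
      rw [ih (j - 1) (res ++ s) (by omega)]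
      cases pvCollect matriz ((PySem.List.pyRange (j - 1) (-1) (-1)).map (fun k => (i, k))) <;>
        simp [String.append_assoc]

theorem pv_arr (matriz : List (List String)) (j : Int) :
    ∀ (n : ℕ) (i : Int) (res : String), i + 1 = n →
    recorrer_matriz matriz i j (some "arriba") res =
      (pvCollect matriz ((PySem.List.pyRange i (-1) (-1)).map (fun k => (k, j)))).map (fun t => res ++ t) := by
  intro n
  induction n with
  | zero =>
    intro i res hi
    have hi' : i = -1 := by omega
    subst hi'
    rw [recorrer_matriz, PySem.List.pyRange_neg_one_eq_nil (by omega)]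
    simp [pvCollect]
  | succ m ih =>
    intro i res hi
    rw [recorrer_matriz, PySem.List.pyRange_neg_one_cons (by omega)]
    simp only [List.map_cons, pvCollect]
    have hne : ¬ (i = -1) := by omega
    simp only [hne, String.reduceEq, reduceIte, if_false, if_true]
    split <;> rename_i hstep
    · simp [hstep]
    · rename_i s
      simp only [hstep]
      rw [ih (i - 1) (res ++ s) (by omega)]
      cases pvCollect matriz ((PySem.List.pyRange (i - 1) (-1) (-1)).map (fun k => (k, j))) <;>
        simp [String.append_assoc]

theorem pv_der (matriz : List (List String)) (row0 : List String)
    (hrow0 : PySem.List.pyGet? matriz 0 = some row0) (i : Int) :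
    ∀ (n : ℕ) (j : Int) (res : String), ((row0.length : Int) - j).toNat = n → j ≤ (row0.length : Int) →
    recorrer_matriz matriz i j (some "derecha") res =
      (pvCollect matriz ((PySem.List.pyRange j (row0.length : Int) 1).map (fun k => (i, k)))).map (fun t => res ++ t) := by
  intro n
  induction n with
  | zero =>
    intro j res hn hle
    have hj : j = (row0.length : Int) := by omega
    rw [recorrer_matriz, hrow0, PySem.List.pyRange_one_eq_nil (by omega)]
    simp [pvCollect, hj]
  | succ m ih =>
    intro j res hn hle
    have hlt : j < (row0.length : Int) := by omega
    rw [recorrer_matriz, hrow0, PySem.List.pyRange_one_cons hlt]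
    simp only [List.map_cons, pvCollect]
    have hne : ¬ (j = (row0.length : Int)) := by omega
    simp only [hne, String.reduceEq, reduceIte, if_false, if_true]
    split <;> rename_i hstep
    · simp [hstep]
    · rename_i s
      simp only [hstep]
      rw [ih (j + 1) (res ++ s) (by omega) (by omega)]
      cases pvCollect matriz ((PySem.List.pyRange (j + 1) (row0.length : Int) 1).map (fun k => (i, k))) <;>
        simp [String.append_assoc]

theorem pv_ab (matriz : List (List String)) (j : Int) :
    ∀ (n : ℕ) (i : Int) (res : String), ((matriz.length : Int) - i).toNat = n → i ≤ (matriz.length : Int) →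
    recorrer_matriz matriz i j (some "abajo") res =
      (pvCollect matriz ((PySem.List.pyRange i (matriz.length : Int) 1).map (fun k => (k, j)))).map (fun t => res ++ t) := by
  intro n
  induction n with
  | zero =>
    intro i res hn hle
    have hi : i = (matriz.length : Int) := by omega
    rw [recorrer_matriz, PySem.List.pyRange_one_eq_nil (by omega)]
    simp [pvCollect, hi]
  | succ m ih =>
    intro i res hn hle
    have hlt : i < (matriz.length : Int) := by omega
    rw [recorrer_matriz, PySem.List.pyRange_one_cons hlt]
    simp only [List.map_cons, pvCollect]
    have hne : ¬ (i = (matriz.length : Int)) := by omega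
    simp only [hne, String.reduceEq, reduceIte, if_false, if_true]
    split <;> rename_i hstep
    · simp [hstep]
    · rename_i s
      simp only [hstep]
      rw [ih (i + 1) (res ++ s) (by omega) (by omega)]
      cases pvCollect matriz ((PySem.List.pyRange (i + 1) (matriz.length : Int) 1).map (fun k => (k, j))) <;>
        simp [String.append_assoc]

theorem pvHead0 (matriz : List (List String)) (h : 0 < matriz.length) :
    PySem.List.pyGet? matriz 0 = some (matriz.headD []) := by
  cases matriz with
  | nil => simp at h
  | cons x xs => simp [PySem.List.pyGet?, PySem.List.pyIdx?, PySem.Raise.InRange]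

theorem pv_izq_gather (matriz : List (List String)) (i j : Int) (res : String) (h : pvOkIzq matriz i j) :
    recorrer_matriz matriz i j (some "izquierda") res = pvGather matriz i j "izquierda" res := by
  have hj : -1 ≤ j := by rcases h with h | h; omega; omega
  rw [pvGather]; simp only [if_pos rfl]
  exact pv_izq matriz i (j + 1).toNat j res (by omega)

theorem pv_der_gather (matriz : List (List String)) (i j : Int) (res : String) (h : pvOkDer matriz i j) :
    recorrer_matriz matriz i j (some "derecha") res = pvGather matriz i j "derecha" res := by
  obtain ⟨hpos, hcase⟩ := h
  have hrow0 := pvHead0 matriz hpos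
  have hle : j ≤ ((matriz.headD []).length : Int) := by rcases hcase with h | h; omega; omega
  rw [pvGather]
  simp only [String.reduceEq, reduceIte, hrow0]
  exact pv_der matriz (matriz.headD []) hrow0 i _ j res rfl hle

theorem pv_arr_gather (matriz : List (List String)) (i j : Int) (res : String) (h : pvOkArr matriz i j) :
    recorrer_matriz matriz i j (some "arriba") res = pvGather matriz i j "arriba" res := by
  have hi : -1 ≤ i := by rcases h with h | h; omega; omega
  rw [pvGather]
  simp only [String.reduceEq, reduceIte]
  exact pv_arr matriz j (i + 1).toNat i res (by omega)

theorem pv_ab_gather (matriz : List (List String)) (i j : Int) (res : String) (h : pvOkAb matriz i j) :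
    recorrer_matriz matriz i j (some "abajo") res = pvGather matriz i j "abajo" res := by
  have hi : i ≤ (matriz.length : Int) := by rcases h with h | h; omega; omega
  rw [pvGather]
  simp only [String.reduceEq, reduceIte]
  exact pv_ab matriz j _ i res rfl hi

-- ===== VERDICT (by name: the statement is the Claim_ definition above) =====
theorem recorrer_matriz_spec : Claim_equal_recorrer_matriz := by
  intro matriz i j direccion resultado _ hpre
  unfold Spec_recorrer_matriz
  match direccion with
  | none =>
    obtain ⟨h1, h2, h3, h4⟩ : pvOkIzq matriz i j ∧ pvOkDer matriz i j ∧ pvOkArr matriz i j ∧ pvOkAb matriz i j := by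
      simpa [Pre_recorrer_matriz] using hpre
    rw [recorrer_matriz, recorrer_matriz_alt,
        pv_izq_gather matriz i j "" h1, pv_der_gather matriz i j "" h2,
        pv_arr_gather matriz i j "" h3, pv_ab_gather matriz i j "" h4]
    cases pvGather matriz i j "izquierda" "" <;> cases pvGather matriz i j "derecha" "" <;>
      cases pvGather matriz i j "arriba" "" <;> cases pvGather matriz i j "abajo" "" <;> simp
  | some dir =>
    rw [recorrer_matriz_alt]
    by_cases h1 : dir = "izquierda"
    · subst h1
      exact pv_izq_gather matriz i j resultado (by simpa [Pre_recorrer_matriz] using hpre)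
    · by_cases h2 : dir = "derecha"
      · subst h2
        exact pv_der_gather matriz i j resultado (by simpa [Pre_recorrer_matriz] using hpre)
      · by_cases h3 : dir = "arriba"
        · subst h3
          exact pv_arr_gather matriz i j resultado (by simpa [Pre_recorrer_matriz] using hpre)
        · by_cases h4 : dir = "abajo"
          · subst h4
            exact pv_ab_gather matriz i j resultado (by simpa [Pre_recorrer_matriz] using hpre)
          · rw [recorrer_matriz, pvGather]
            simp [h1, h2, h3, h4]
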